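-- pv_equiv track=rewrite | github.com/pablogventura/QfDefAlg | parser/preprocessing.py | preprocesamiento
-- ===== SOURCE A (Python) =====
-- from collections import defaultdict, OrderedDict
--
-- def quotient(s, f):
--     # cociente del conjunto s, por la funcion f
--     result = {e: [e] for e in s}
--     for a in s:
--         if a not in result:
--             continue
--         for b in s:
--             if b not in result or a == b:
--                 continue
--             if f(b) == f(a):
--                 result[a] += result[b]
--                 del result[b]
--     return result
--
-- def patron(t):
--     # cociente del conjunto s, por la funcion f
--     result = defaultdict(set)
--     for i, a in enumerate(t):
--         result[a].add(i)
--     return set(frozenset(s) for s in result.values())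
--
-- def limpia(t):
--     result = set()
--     for e in t:
--         result.add(t.index(e))
--     return sorted(result)
--
-- def preprocesamiento(T):
--     result = []
--     q = quotient(T, patron)
--     for p in q:
--         indices = limpia(p)
--         result.append(set())
--         for t in q[p]:
--             result[-1].add(tuple(t[i] for i in indices))
--     return set(frozenset(e) for e in result)
-- ===== SOURCE B (Python) =====
-- def preprocesamiento(T):
--     # One-pass grouping by the hashable equality-pattern key (frozenset of index
--     # classes) instead of A's all-pairs quotient; then one projection pass per group.
--     groups = {}
--     for t in T:
--         classes = {}
--         for i, v in enumerate(t):
--             classes.setdefault(v, []).append(i)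
--         key = frozenset(frozenset(c) for c in classes.values())
--         groups.setdefault(key, []).append(t)
--     result = set()
--     for key, g in groups.items():
--         indices = sorted(min(c) for c in key)
--         result.add(frozenset(tuple(t[i] for i in indices) for t in g))
--     return result
-- ===== Notes on version B (the rewrite author's own statement) =====
-- stated objective: faster
-- what changed: B groups the tuples in one pass by a hashable pattern key (the frozenset of equal-value index classes, computed per tuple in one scan) in a dict, instead of A's all-pairs quotient loop that compares patron(a)==patron(b) for every pair and mutates the dict; projections are then taken once per group from the stored key.
import Mathlib
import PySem

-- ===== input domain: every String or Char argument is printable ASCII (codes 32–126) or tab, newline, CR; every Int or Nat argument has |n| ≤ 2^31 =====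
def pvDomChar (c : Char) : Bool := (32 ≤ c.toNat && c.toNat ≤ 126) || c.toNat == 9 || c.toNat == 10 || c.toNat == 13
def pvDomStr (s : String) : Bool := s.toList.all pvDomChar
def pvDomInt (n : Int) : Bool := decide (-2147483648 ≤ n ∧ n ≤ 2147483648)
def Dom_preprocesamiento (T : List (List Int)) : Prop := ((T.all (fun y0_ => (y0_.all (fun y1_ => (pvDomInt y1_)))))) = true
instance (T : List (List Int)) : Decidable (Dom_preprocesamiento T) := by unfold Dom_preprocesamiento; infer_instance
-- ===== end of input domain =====

-- B replaces A's all-pairs quotient by one-pass dict grouping on a hashable pattern key (objective: faster).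
-- The list T stands for the Python set argument; the claims are about the RETURN value (neither version mutates T).

-- ===== PORT A =====
-- Python '==' on two frozensets of ints (hand-ported set equality: mutual containment; exact)
def setEqN (a b : List Int) : Bool := a.all (b.contains ·) && b.all (a.contains ·)
-- Python '==' on two sets whose elements are frozensets of ints (exact: elementwise set equality)
def setEqNN (a b : List (List Int)) : Bool := a.all (fun x => b.any (setEqN x)) && b.all (fun x => a.any (setEqN x))
-- Python set.add on a set of frozensets of ints (membership test is frozenset equality; exact)
def addNN (s : List (List Int)) (x : List Int) : List (List Int) := if s.any (setEqN x) then s else s ++ [x]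
-- Python '==' on two frozensets of tuples, and set.add on a set of frozensets of tuples (exact)
def setEqT (a b : List (List Int)) : Bool := a.all (b.contains ·) && b.all (a.contains ·)
def addT (s : List (List (List Int))) (x : List (List Int)) : List (List (List Int)) := if s.any (setEqT x) then s else s ++ [x]

-- patron(t): defaultdict(set) keyed by value, then set(frozenset(s) for s in result.values())
def patron (t : List Int) : List (List Int) :=
  let d : PySem.Dict Int (List Int) :=
    (PySem.List.enumerate t).foldl (fun d p => d.insert p.2 (PySem.Set.add (d.getD p.2 []) p.1)) (PySem.Dict.mk [])
  d.values.foldl addNN []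

-- quotient(s, patron): dict comprehension, then the all-pairs merge loop
def quotientA (s : List (List Int)) : PySem.Dict (List Int) (List (List Int)) :=
  let init : PySem.Dict (List Int) (List (List Int)) := s.foldl (fun d e => d.insert e [e]) (PySem.Dict.mk [])
  s.foldl (fun d a =>
    if d.contains a then
      s.foldl (fun d b =>
        if !d.contains b || a == b then d
        else if setEqNN (patron b) (patron a) then (d.modify a [] (· ++ d.getD b [])).erase b
        else d) d
    else d) init

-- limpia(t): set of t.index(e), sorted   (t.index never raises here: e ∈ t)
def limpia (t : List Int) : List Int :=
  PySem.List.sorted (t.foldl (fun r e => PySem.Set.add r (((PySem.List.index? t e).getD 0 : ℕ) : ℤ)) []) id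

-- t[i] for i from limpia/the pattern key is always in range, so getD is exact here
def proj (indices : List Int) (t : List Int) : List Int :=
  indices.map (fun i => (PySem.List.pyGet? t i).getD 0)

def preprocesamiento (T : List (List Int)) : List (List (List Int)) :=
  let q := quotientA T
  let res : List (List (List Int)) := q.keys.foldl (fun res p =>
    let indices := limpia p
    let grp := (q.getD p []).foldl (fun s t => PySem.Set.add s (proj indices t)) []
    res ++ [grp]) []
  res.foldl addT []

-- ===== PORT B =====
-- the pattern key: frozenset of the index classes of t (frozensets of ints)
def keyOf (t : List Int) : List (List Int) :=
  let classes : PySem.Dict Int (List Int) :=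
    (PySem.List.enumerate t).foldl (fun d p => d.insert p.2 (d.getD p.2 [] ++ [p.1])) (PySem.Dict.mk [])
  classes.values.foldl addNN []

-- groups.setdefault(key, []).append(t): Python dict keyed by frozensets — hand-rolled
-- association list whose key comparison is frozenset '==' (setEqNN); exact dict semantics
def bAdd (g : List (List (List Int) × List (List Int))) (k : List (List Int)) (t : List Int) :
    List (List (List Int) × List (List Int)) :=
  match g with
  | [] => [(k, [t])]
  | (k', l) :: rest => if setEqNN k' k then (k', l ++ [t]) :: rest else (k', l) :: bAdd rest k t

def preprocesamiento_alt (T : List (List Int)) : List (List (List Int)) :=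
  let groups := T.foldl (fun g t => bAdd g (keyOf t) t) []
  groups.foldl (fun res p =>
    let indices := PySem.List.sorted (p.1.map (fun c => (PySem.List.min? c id).getD 0)) id
    addT res (p.2.foldl (fun s t => PySem.Set.add s (proj indices t)) [])) []

-- ===== PRECONDITION & SPEC =====
def Spec_preprocesamiento (T : List (List Int)) (out : List (List (List Int))) : Prop := out = preprocesamiento_alt T
instance (T : List (List Int)) (out : List (List (List Int))) : Decidable (Spec_preprocesamiento T out) := by unfold Spec_preprocesamiento; infer_instance

-- ===== CLAIM (what is proved, stated in full; the proofs are below) =====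
def Claim_equal_preprocesamiento : Prop := ∀ (T : List (List Int)), Dom_preprocesamiento T → Spec_preprocesamiento T (preprocesamiento T)


-- ===== LEMMAS AND PROOFS =====

-- ---------- set-equality (Python frozenset ==) basics ----------
theorem setEqN_iff (x y : List Int) : setEqN x y = true ↔ (∀ z : Int, z ∈ x ↔ z ∈ y) := by
  unfold setEqN
  simp only [Bool.and_eq_true, List.all_eq_true, List.contains_iff_mem]
  constructor
  · rintro ⟨h1, h2⟩ z
    exact ⟨fun hz => by simpa using h1 z hz, fun hz => by simpa using h2 z hz⟩
  · intro h
    exact ⟨fun z hz => by simp [(h z).mp hz], fun z hz => by simp [(h z).mpr hz]⟩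

theorem setEqN_refl (x : List Int) : setEqN x x = true := by
  rw [setEqN_iff]; intro z; rfl

theorem setEqN_trans {x y z : List Int} (h1 : setEqN x y = true) (h2 : setEqN y z = true) :
    setEqN x z = true := by
  rw [setEqN_iff] at h1 h2 ⊢; intro w; exact (h1 w).trans (h2 w)

def memNN (x : List Int) (X : List (List Int)) : Bool := X.any (setEqN x)

theorem setEqNN_iff (X Y : List (List Int)) :
    setEqNN X Y = true ↔ (∀ x ∈ X, memNN x Y = true) ∧ (∀ y ∈ Y, memNN y X = true) := by
  unfold setEqNN memNN
  simp [List.all_eq_true]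

theorem memNN_iff (x : List Int) (X : List (List Int)) :
    memNN x X = true ↔ ∃ y ∈ X, setEqN x y = true := by
  unfold memNN; simp

theorem setEqNN_refl (X : List (List Int)) : setEqNN X X = true := by
  rw [setEqNN_iff]
  refine ⟨?_, ?_⟩ <;> exact fun x hx => (memNN_iff x X).mpr ⟨x, hx, setEqN_refl x⟩

theorem setEqNN_symm {X Y : List (List Int)} (h : setEqNN X Y = true) : setEqNN Y X = true := by
  rw [setEqNN_iff] at h ⊢; exact ⟨h.2, h.1⟩

theorem setEqNN_trans {X Y Z : List (List Int)} (h1 : setEqNN X Y = true) (h2 : setEqNN Y Z = true) :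
    setEqNN X Z = true := by
  rw [setEqNN_iff] at h1 h2 ⊢
  constructor
  · intro x hx
    obtain ⟨y, hy, hxy⟩ := (memNN_iff _ _).mp (h1.1 x hx)
    obtain ⟨z, hz, hyz⟩ := (memNN_iff _ _).mp (h2.1 y hy)
    exact (memNN_iff _ _).mpr ⟨z, hz, setEqN_trans hxy hyz⟩
  · intro z hz
    obtain ⟨y, hy, hzy⟩ := (memNN_iff _ _).mp (h2.2 z hz)
    obtain ⟨x, hx, hyx⟩ := (memNN_iff _ _).mp (h1.2 y hy)
    exact (memNN_iff _ _).mpr ⟨x, hx, setEqN_trans hzy hyx⟩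

-- the grouping relation: equal patterns
def eqt (a b : List Int) : Bool := setEqNN (keyOf a) (keyOf b)

theorem eqt_refl (a : List Int) : eqt a a = true := setEqNN_refl _
theorem eqt_symm {a b : List Int} (h : eqt a b = true) : eqt b a = true := setEqNN_symm h
theorem eqt_trans {a b c : List Int} (h1 : eqt a b = true) (h2 : eqt b c = true) : eqt a c = true :=
  setEqNN_trans h1 h2


-- ---------- generic dict-as-mapped-list lemmas ----------
theorem items_mk {κ ν : Type} (L : List (κ × ν)) : (PySem.Dict.mk L).items = L := rfl

theorem get?_mk_map_nodup {κ ν : Type} [BEq κ] [LawfulBEq κ] (S : List κ) (v : κ → ν) (h : S.Nodup) (y : κ) :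
    (PySem.Dict.mk (S.map (fun x => (x, v x)))).get? y = if y ∈ S then some (v y) else none := by
  induction S with
  | nil => simp [PySem.Dict.get?]
  | cons x S ih =>
    simp only [List.nodup_cons] at h
    simp only [List.map_cons, PySem.Dict.get?, List.find?]
    by_cases hxy : x = y
    · subst hxy; simp
    · have : ((x, v x).1 == y) = false := by simp [hxy]
      rw [this]
      have := ih h.2
      simp only [PySem.Dict.get?] at this
      rw [this]
      simp [List.mem_cons, Ne.symm hxy]

theorem contains_mk_map {κ ν : Type} [BEq κ] [LawfulBEq κ] (S : List κ) (v : κ → ν) (y : κ) :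
    (PySem.Dict.mk (S.map (fun x => (x, v x)))).contains y = S.contains y := by
  induction S with
  | nil => rfl
  | cons x S ih =>
    simp only [List.map_cons, PySem.Dict.contains, List.any_cons] at *
    by_cases hxy : x = y <;> simp [beq_iff_eq, hxy, Ne.symm, ih]

theorem insert_mk_map_mem {κ ν : Type} [BEq κ] [LawfulBEq κ] [DecidableEq κ] (S : List κ) (v : κ → ν) (y : κ) (w : ν)
    (hy : y ∈ S) :
    (PySem.Dict.mk (S.map (fun x => (x, v x)))).insert y w
      = PySem.Dict.mk (S.map (fun x => (x, if x = y then w else v x))) := by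
  have hc : (PySem.Dict.mk (S.map (fun x => (x, v x)))).contains y = true := by
    rw [contains_mk_map]; simp [hy]
  simp only [PySem.Dict.insert, hc, if_pos]
  congr 1
  rw [List.map_map]
  apply List.map_congr_left
  intro x _
  by_cases hxy : x = y <;> simp [hxy]

theorem insert_mk_map_new {κ ν : Type} [BEq κ] [LawfulBEq κ] [DecidableEq κ] (S : List κ) (v : κ → ν) (y : κ) (w : ν)
    (hy : y ∉ S) :
    (PySem.Dict.mk (S.map (fun x => (x, v x)))).insert y w
      = PySem.Dict.mk ((S ++ [y]).map (fun x => (x, if x = y then w else v x))) := by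
  have hc : (PySem.Dict.mk (S.map (fun x => (x, v x)))).contains y = false := by
    rw [contains_mk_map]; simp [hy]
  simp only [PySem.Dict.insert, hc]
  simp only [Bool.false_eq_true, if_false, List.map_append, List.map_cons, List.map_nil]
  have h1 : List.map (fun x => (x, v x)) S = List.map (fun x => (x, if x = y then w else v x)) S := by
    apply List.map_congr_left
    intro x hx
    have : x ≠ y := fun h => hy (h ▸ hx)
    simp [this]
  rw [h1]
  simp

theorem erase_mk_map {κ ν : Type} [BEq κ] [LawfulBEq κ] (S : List κ) (v : κ → ν) (y : κ) :
    (PySem.Dict.mk (S.map (fun x => (x, v x)))).erase y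
      = PySem.Dict.mk ((S.filter (fun x => !(x == y))).map (fun x => (x, v x))) := by
  simp only [PySem.Dict.erase, List.filter_map]
  rfl

-- ---------- enumerate ----------
theorem enum_cons (x : Int) (t : List Int) (s : Int) :
    PySem.List.enumerate (x :: t) s = (s, x) :: PySem.List.enumerate t (s + 1) := rfl

theorem enum_fst_ge (t : List Int) (s : Int) : ∀ p ∈ PySem.List.enumerate t s, s ≤ p.1 := by
  induction t generalizing s with
  | nil => intro p hp; simp [PySem.List.enumerate] at hp
  | cons x t ih =>
    intro p hp
    rw [enum_cons] at hp
    rcases List.mem_cons.mp hp with hp | hp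
    · simp [hp]
    · have := ih (s + 1) p hp; omega

theorem enum_snd (t : List Int) (s : Int) : (PySem.List.enumerate t s).map (·.2) = t := by
  induction t generalizing s with
  | nil => rfl
  | cons x t ih => rw [enum_cons]; simp [ih]

theorem enum_fst_nodup (t : List Int) (s : Int) : ((PySem.List.enumerate t s).map (·.1)).Nodup := by
  induction t generalizing s with
  | nil => simp [PySem.List.enumerate]
  | cons x t ih =>
    rw [enum_cons]
    simp only [List.map_cons, List.nodup_cons]
    refine ⟨?_, ih (s + 1)⟩
    intro hmem
    obtain ⟨p, hp, hfst⟩ := List.mem_map.mp hmem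
    have := enum_fst_ge t (s + 1) p hp; omega

theorem enum_inj (t : List Int) (s : Int) {p q : Int × Int}
    (hp : p ∈ PySem.List.enumerate t s) (hq : q ∈ PySem.List.enumerate t s) (h : p.1 = q.1) : p = q := by
  exact List.inj_on_of_nodup_map (enum_fst_nodup t s) hp hq h

-- ---------- the class dictionary, closed form ----------
def vf (l : List (Int × Int)) (v : Int) : List Int := (l.filter (fun p => p.2 == v)).map (·.1)
def classOf (t : List Int) (v : Int) : List Int := vf (PySem.List.enumerate t) v
def classList (t : List Int) : List (List Int) := (PySem.Set.ofList t).map (classOf t)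

theorem items_dictAppendFold (l : List (Int × Int)) :
    (l.foldl (fun d p => d.insert p.2 (d.getD p.2 [] ++ [p.1])) (PySem.Dict.mk [])).items
      = (PySem.Set.ofList (l.map (·.2))).map (fun v => (v, vf l v)) := by
  induction l using List.reverseRecOn with
  | nil => rfl
  | append_singleton l p ih =>
    rw [List.foldl_append, List.foldl_cons, List.foldl_nil]
    have hnd : (PySem.Set.ofList (l.map (·.2))).Nodup := PySem.Set.nodup_ofList _
    have hd : (l.foldl (fun d p => d.insert p.2 (d.getD p.2 [] ++ [p.1])) (PySem.Dict.mk []))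
        = PySem.Dict.mk ((PySem.Set.ofList (l.map (·.2))).map (fun v => (v, vf l v))) :=
      PySem.Dict.ext (by rw [ih])
    rw [hd]
    have hvf : ∀ v : Int, vf (l ++ [p]) v = vf l v ++ (if p.2 = v then [p.1] else []) := by
      intro v
      unfold vf
      rw [List.filter_append]
      by_cases hv : p.2 = v <;> simp [hv]
    by_cases hp : p.2 ∈ l.map (·.2)
    · have hgetD : (PySem.Dict.mk ((PySem.Set.ofList (l.map (·.2))).map (fun v => (v, vf l v)))).getD p.2 []
          = vf l p.2 := by
        rw [PySem.Dict.getD_eq_get?_getD, get?_mk_map_nodup _ _ hnd]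
        simp [PySem.Set.mem_ofList, hp]
      rw [hgetD, insert_mk_map_mem _ _ _ _ (by rw [PySem.Set.mem_ofList]; exact hp)]
      have hS : PySem.Set.ofList ((l ++ [p]).map (·.2)) = PySem.Set.ofList (l.map (·.2)) := by
        rw [List.map_append, List.map_cons, List.map_nil, PySem.Set.ofList_append_singleton,
          PySem.Set.add_of_mem (by rw [PySem.Set.mem_ofList]; exact hp)]
      rw [hS]
      apply List.map_congr_left
      intro v _
      by_cases hv : v = p.2
      · simp [hv, hvf]
      · simp [hv, hvf, Ne.symm hv]
    · have hgetD : (PySem.Dict.mk ((PySem.Set.ofList (l.map (·.2))).map (fun v => (v, vf l v)))).getD p.2 []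
          = [] := by
        rw [PySem.Dict.getD_eq_get?_getD, get?_mk_map_nodup _ _ hnd]
        simp [PySem.Set.mem_ofList, hp]
      rw [hgetD, insert_mk_map_new _ _ _ _ (by rw [PySem.Set.mem_ofList]; exact hp)]
      have hS : PySem.Set.ofList ((l ++ [p]).map (·.2)) = PySem.Set.ofList (l.map (·.2)) ++ [p.2] := by
        rw [List.map_append, List.map_cons, List.map_nil, PySem.Set.ofList_append_singleton,
          PySem.Set.add_of_not_mem (by rw [PySem.Set.mem_ofList]; exact hp)]
      rw [hS]
      apply List.map_congr_left
      intro v hv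
      rcases List.mem_append.mp hv with hv | hv
      · have hvne : v ≠ p.2 := fun h => hp (by rw [← h]; exact (PySem.Set.mem_ofList _ _).mp hv)
        simp [hvne, hvf, Ne.symm hvne]
      · have hveq : v = p.2 := by simpa using hv
        subst hveq
        have : vf l p.2 = [] := by
          unfold vf
          rw [List.filter_eq_nil_iff.mpr, List.map_nil]
          intro q hq hq2
          exact hp (List.mem_map.mpr ⟨q, hq, by simpa using hq2⟩)
        simp [hvf, this]

theorem fold_add_eq_append (l : List (Int × Int)) (d : PySem.Dict Int (List Int))
    (hinv : ∀ p ∈ l, ∀ v, p.1 ∉ d.getD v []) (hnd : (l.map (·.1)).Nodup) :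
    l.foldl (fun d p => d.insert p.2 (PySem.Set.add (d.getD p.2 []) p.1)) d
      = l.foldl (fun d p => d.insert p.2 (d.getD p.2 [] ++ [p.1])) d := by
  induction l generalizing d with
  | nil => rfl
  | cons p l ih =>
    rw [List.foldl_cons, List.foldl_cons]
    have hnotmem : p.1 ∉ d.getD p.2 [] := hinv p (List.mem_cons_self) p.2
    rw [PySem.Set.add_of_not_mem hnotmem]
    apply ih
    · intro q hq v
      rw [PySem.Dict.getD_insert]
      simp only [List.map_cons, List.nodup_cons] at hnd
      have hfst : q.1 ≠ p.1 := by
        intro h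
        exact hnd.1 (h ▸ List.mem_map.mpr ⟨q, hq, rfl⟩)
      by_cases hv : v = p.2
      · subst hv
        intro hmem
        rw [if_pos rfl] at hmem
        rcases List.mem_append.mp hmem with hmem | hmem
        · exact hinv q (List.mem_cons_of_mem _ hq) _ hmem
        · exact hfst (by simpa using hmem)
      · simp only [hv, if_false]
        exact hinv q (List.mem_cons_of_mem _ hq) v
    · simp only [List.map_cons, List.nodup_cons] at hnd
      exact hnd.2

-- ---------- addNN on pairwise-disjoint classes appends all ----------
theorem addNN_fold_id (L : List (List Int)) (h : L.Pairwise (fun a b => setEqN b a = false)) :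
    L.foldl addNN [] = L := by
  induction L using List.reverseRecOn with
  | nil => rfl
  | append_singleton L c ih =>
    rw [List.foldl_append, List.foldl_cons, List.foldl_nil]
    have hpw := (List.pairwise_append.mp h)
    rw [ih hpw.1]
    unfold addNN
    have : L.any (setEqN c) = false := by
      rw [List.any_eq_false]
      intro a ha
      have := hpw.2.2 a ha c (List.mem_singleton_self _)
      simp [this]
    rw [this]
    simp

theorem classList_pairwise (t : List Int) :
    (classList t).Pairwise (fun a b => setEqN b a = false) := by
  unfold classList
  have hnd : (PySem.Set.ofList t).Nodup := PySem.Set.nodup_ofList _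
  rw [List.pairwise_map]
  have key : ∀ v ∈ PySem.Set.ofList t, ∀ w ∈ PySem.Set.ofList t, v ≠ w →
      setEqN (classOf t w) (classOf t v) = false := by
    intro v hv w hw hvw
    have hw' : w ∈ t := (PySem.Set.mem_ofList _ _).mp hw
    obtain ⟨p, hp, hp2⟩ : ∃ p ∈ PySem.List.enumerate t 0, p.2 = w := by
      have : w ∈ (PySem.List.enumerate t 0).map (·.2) := by rw [enum_snd]; exact hw'
      obtain ⟨p, hp, hp2⟩ := List.mem_map.mp this
      exact ⟨p, hp, hp2⟩
    have hmemw : p.1 ∈ classOf t w := by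
      unfold classOf vf
      exact List.mem_map.mpr ⟨p, List.mem_filter.mpr ⟨hp, by simp [hp2]⟩, rfl⟩
    by_contra hne
    have hT : setEqN (classOf t w) (classOf t v) = true := by
      cases hcc : setEqN (classOf t w) (classOf t v)
      · exact absurd hcc hne
      · rfl
    have hmemv : p.1 ∈ classOf t v := ((setEqN_iff _ _).mp hT p.1).mp hmemw
    obtain ⟨q, hq, hq1⟩ := List.mem_map.mp hmemv
    have hqf := List.mem_filter.mp hq
    have : q = p := enum_inj t 0 hqf.1 hp (by rw [hq1])
    subst this
    have : q.2 = v := by simpa using hqf.2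
    exact hvw (by rw [← this, hp2])
  exact List.Pairwise.imp_of_mem (fun {a b} ha hb hab => key a ha b hb hab) hnd

theorem values_dictAppendFold (t : List Int) :
    ((PySem.List.enumerate t).foldl (fun d p => d.insert p.2 (d.getD p.2 [] ++ [p.1]))
      (PySem.Dict.mk [])).values = classList t := by
  unfold PySem.Dict.values
  rw [items_dictAppendFold, List.map_map]
  unfold classList classOf
  rw [enum_snd]
  rfl

theorem keyOf_eq (t : List Int) : keyOf t = classList t := by
  show List.foldl addNN [] ((PySem.List.enumerate t).foldl
      (fun d p => d.insert p.2 (d.getD p.2 [] ++ [p.1])) (PySem.Dict.mk [])).values = classList t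
  rw [values_dictAppendFold]
  exact addNN_fold_id _ (classList_pairwise t)

theorem patron_eq (t : List Int) : patron t = classList t := by
  show List.foldl addNN [] ((PySem.List.enumerate t).foldl
      (fun d p => d.insert p.2 (PySem.Set.add (d.getD p.2 []) p.1)) (PySem.Dict.mk [])).values = classList t
  rw [fold_add_eq_append _ _ ?hinv (enum_fst_nodup t 0)]
  · rw [values_dictAppendFold]
    exact addNN_fold_id _ (classList_pairwise t)
  case hinv =>
    intro p _ v
    simp [PySem.Dict.getD, PySem.Dict.get?]

-- ---------- representatives and the quotient loop ----------
def repL (L : List (List Int)) (x : List Int) : List Int := (L.find? (fun u => eqt u x)).getD x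
def repFold (L : List (List Int)) : List (List Int) :=
  L.foldl (fun rs t => if rs.any (fun r => eqt r t) then rs else rs ++ [t]) []
def survQ (T P : List (List Int)) : List (List Int) :=
  (PySem.Set.ofList T).filter (fun x => x == repL T x || !(P.contains (repL T x)))
def valQ (T P : List (List Int)) (x : List Int) : List (List Int) :=
  if x == repL T x && P.contains x then PySem.Set.ofList (T.filter (fun b => eqt b x)) else [x]
def dictQ (T P : List (List Int)) : PySem.Dict (List Int) (List (List Int)) :=
  PySem.Dict.mk ((survQ T P).map (fun x => (x, valQ T P x)))
def innerF (a : List Int) (d : PySem.Dict (List Int) (List (List Int))) (b : List Int) :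
    PySem.Dict (List Int) (List (List Int)) :=
  if !d.contains b || a == b then d
  else if eqt b a then (d.modify a [] (· ++ d.getD b [])).erase b else d
def outerF (T : List (List Int)) (d : PySem.Dict (List Int) (List (List Int))) (a : List Int) :
    PySem.Dict (List Int) (List (List Int)) :=
  if d.contains a then T.foldl (innerF a) d else d
def survI (T P Q : List (List Int)) (a : List Int) : List (List Int) :=
  (survQ T P).filter (fun x => x == a || !(Q.contains x) || !(eqt x a))
def valI (T P Q : List (List Int)) (a x : List Int) : List (List Int) :=
  if x == a then PySem.Set.update [a] (Q.filter (fun b => eqt b a && !(b == a))) else valQ T P x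
def dictI (T P Q : List (List Int)) (a : List Int) : PySem.Dict (List Int) (List (List Int)) :=
  PySem.Dict.mk ((survI T P Q a).map (fun x => (x, valI T P Q a x)))


theorem contains_snoc (l : List (List Int)) (c y : List Int) :
    (l ++ [c]).contains y = (l.contains y || y == c) := by
  by_cases h1 : y ∈ l <;> by_cases h2 : y = c <;>
    simp [List.contains_eq_mem, List.mem_append, h1, h2]

theorem ofList_cons_update (a : List Int) (l : List (List Int)) :
    PySem.Set.ofList (a :: l) = PySem.Set.update [a] l := by
  rw [PySem.Set.ofList_eq_foldl, List.foldl_cons]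
  rfl

theorem repL_eqt {L : List (List Int)} {x : List Int} (hx : x ∈ L) : eqt (repL L x) x = true := by
  unfold repL
  cases hf : L.find? (fun u => eqt u x) with
  | none => exact absurd hf (by simp [List.find?_eq_none]; exact ⟨x, hx, eqt_refl x⟩)
  | some u => simpa using List.find?_some hf

theorem repL_mem {L : List (List Int)} {x : List Int} (hx : x ∈ L) : repL L x ∈ L := by
  unfold repL
  cases hf : L.find? (fun u => eqt u x) with
  | none => simpa using hx
  | some u => simpa using List.mem_of_find?_eq_some hf

theorem eqt_pred_congr {x y : List Int} (h : eqt x y = true) (u : List Int) : eqt u x = eqt u y := by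
  rw [Bool.eq_iff_iff]
  exact ⟨fun h1 => eqt_trans h1 h, fun h1 => eqt_trans h1 (eqt_symm h)⟩

theorem repL_congr {L : List (List Int)} {x y : List Int} (hx : x ∈ L) (h : eqt x y = true) :
    repL L x = repL L y := by
  unfold repL
  have hfun : (fun u => eqt u x) = (fun u => eqt u y) := funext (eqt_pred_congr h)
  rw [hfun]
  cases hf : L.find? (fun u => eqt u y) with
  | none => exact absurd hf (by simp [List.find?_eq_none]; exact ⟨x, hx, h⟩)
  | some u => rfl

theorem repL_idem {L : List (List Int)} {x : List Int} (hx : x ∈ L) : repL L (repL L x) = repL L x := by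
  exact repL_congr (repL_mem hx) (repL_eqt hx)

theorem repL_eq_of_eqt {L : List (List Int)} {x a : List Int} (hx : x ∈ L) (ha : a ∈ L)
    (haa : repL L a = a) (h : eqt x a = true) : repL L x = a := by
  rw [repL_congr hx h, haa]

theorem eqt_iff_rep {T : List (List Int)} {x a : List Int} (hxT : x ∈ T) (haT : a ∈ T)
    (ha : repL T a = a) : eqt x a = (repL T x == a) := by
  rw [Bool.eq_iff_iff, beq_iff_eq]
  constructor
  · exact fun h => repL_eq_of_eqt hxT haT ha h
  · intro h
    exact eqt_symm (h ▸ repL_eqt hxT)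

theorem repL_append_cases (P R : List (List Int)) (a : List Int) :
    repL (P ++ a :: R) a = a ∨ repL (P ++ a :: R) a ∈ P := by
  unfold repL
  rw [List.find?_append]
  cases hf : P.find? (fun u => eqt u a) with
  | none => simp [List.find?_cons, eqt_refl a]
  | some u => exact Or.inr (by simpa using List.mem_of_find?_eq_some hf)

theorem not_eqt_of_fresh_rep {P R : List (List Int)} {a : List Int}
    (h : repL (P ++ a :: R) a = a) (hnp : a ∉ P) : ∀ b ∈ P, eqt b a = false := by
  intro b hb
  cases hf : P.find? (fun u => eqt u a) with
  | none => simpa using List.find?_eq_none.mp hf b hb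
  | some u =>
    have hu : repL (P ++ a :: R) a = u := by
      unfold repL; rw [List.find?_append, hf]; rfl
    have : u ∈ P := by simpa using List.mem_of_find?_eq_some hf
    rw [hu] at h
    exact absurd (h ▸ this) hnp

theorem foldl_id_of_fix {α β : Type} (l : List α) (f : β → α → β) (d : β)
    (h : ∀ b ∈ l, f d b = d) : l.foldl f d = d := by
  induction l with
  | nil => rfl
  | cons b l ih =>
    rw [List.foldl_cons, h b List.mem_cons_self]
    exact ih (fun b hb => h b (List.mem_cons_of_mem _ hb))

theorem update_filter_beq_absorb (l s : List (List Int)) (p : List Int → Bool) (y : List Int)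
    (hy : y ∈ s) :
    PySem.Set.update s (l.filter (fun b => p b && !(b == y))) = PySem.Set.update s (l.filter p) := by
  induction l generalizing s with
  | nil => rfl
  | cons b l ih =>
    by_cases hpb : p b = true
    · by_cases hby : b = y
      · subst hby
        simp only [List.filter_cons, hpb, beq_self_eq_true, Bool.not_true, Bool.and_false,
          Bool.and_true, if_true]
        rw [PySem.Set.update_cons, PySem.Set.add_of_mem hy]
        exact ih s hy
      · have hbeq : (b == y) = false := by simp [hby]
        simp only [List.filter_cons, hpb, hbeq, Bool.not_false, Bool.and_true, if_true]
        rw [PySem.Set.update_cons, PySem.Set.update_cons]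
        exact ih (PySem.Set.add s b) ((PySem.Set.mem_add _ _ _).mpr (Or.inl hy))
    · simp only [List.filter_cons, hpb]
      simp only [Bool.false_and, if_false]
      exact ih s hy

theorem repL_append_of_mem {L : List (List Int)} {x : List Int} (hx : x ∈ L) (M : List (List Int)) :
    repL (L ++ M) x = repL L x := by
  unfold repL
  rw [List.find?_append]
  cases hf : L.find? (fun u => eqt u x) with
  | none => exact absurd hf (by simp [List.find?_eq_none]; exact ⟨x, hx, eqt_refl x⟩)
  | some u => rfl

theorem repFold_eq (L : List (List Int)) :
    repFold L = (PySem.Set.ofList L).filter (fun x => x == repL L x) := by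
  induction L using List.reverseRecOn with
  | nil => rfl
  | append_singleton L t ih =>
    have hstep : repFold (L ++ [t])
        = if (repFold L).any (fun r => eqt r t) then repFold L else repFold L ++ [t] := by
      unfold repFold
      rw [List.foldl_append, List.foldl_cons, List.foldl_nil]
    have hcongr : (PySem.Set.ofList L).filter (fun x => x == repL (L ++ [t]) x)
        = (PySem.Set.ofList L).filter (fun x => x == repL L x) := by
      apply List.filter_congr
      intro x hx
      rw [repL_append_of_mem ((PySem.Set.mem_ofList _ _).mp hx)]
    rw [hstep]
    by_cases hm : (repFold L).any (fun r => eqt r t) = true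
    · rw [if_pos hm]
      obtain ⟨r, hr, hrt⟩ := List.any_eq_true.mp hm
      have hrL : r ∈ L := by
        rw [ih] at hr
        exact (PySem.Set.mem_ofList _ _).mp (List.mem_of_mem_filter hr)
      by_cases ht : t ∈ L
      · rw [PySem.Set.ofList_append_singleton, PySem.Set.add_of_mem ((PySem.Set.mem_ofList _ _).mpr ht), hcongr, ih]
      · rw [PySem.Set.ofList_append_singleton,
          PySem.Set.add_of_not_mem (fun h => ht ((PySem.Set.mem_ofList _ _).mp h)),
          List.filter_append, hcongr]
        have hfind : ∃ u, L.find? (fun u => eqt u t) = some u := by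
          cases hf : L.find? (fun u => eqt u t) with
          | none => exact absurd hf (by simp [List.find?_eq_none]; exact ⟨r, hrL, hrt⟩)
          | some u => exact ⟨u, rfl⟩
        obtain ⟨u, hu⟩ := hfind
        have hrepl : repL (L ++ [t]) t = u := by
          unfold repL; rw [List.find?_append, hu]; rfl
        have huL : u ∈ L := List.mem_of_find?_eq_some hu
        have : (t == repL (L ++ [t]) t) = false := by
          rw [hrepl]
          simp only [beq_eq_false_iff_ne, ne_eq]
          exact fun h => ht (h ▸ huL)
        simp [this, ih]
    · rw [if_neg hm]
      have hnomatch := List.any_eq_false.mp (Bool.eq_false_iff.mpr hm)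
      have hnoL : ∀ u ∈ L, eqt u t = false := by
        intro u hu
        by_contra hne
        have hut : eqt u t = true := by
          cases h : eqt u t
          · exact absurd h hne
          · rfl
        have hrmem : repL L u ∈ repFold L := by
          rw [ih]
          refine List.mem_filter.mpr ⟨(PySem.Set.mem_ofList _ _).mpr (repL_mem hu), ?_⟩
          simp [repL_idem hu]
        exact hnomatch _ hrmem (eqt_trans (repL_eqt hu) hut)
      have ht : t ∉ L := fun h => by simpa [eqt_refl t] using hnoL t h
      have hrept : repL (L ++ [t]) t = t := by
        unfold repL
        rw [List.find?_append, List.find?_eq_none.mpr (by intro u hu; simp [hnoL u hu])]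
        simp [eqt_refl t]
      rw [PySem.Set.ofList_append_singleton,
        PySem.Set.add_of_not_mem (fun h => ht ((PySem.Set.mem_ofList _ _).mp h)), List.filter_append,
        hcongr, ih]
      simp [hrept]

theorem repFold_sub {L : List (List Int)} : ∀ r ∈ repFold L, r ∈ L := by
  intro r hr
  rw [repFold_eq] at hr
  exact (PySem.Set.mem_ofList _ _).mp (List.mem_of_mem_filter hr)

theorem repFold_self {L : List (List Int)} : ∀ r ∈ repFold L, repL L r = r := by
  intro r hr
  rw [repFold_eq] at hr
  have h2 : r = repL L r := by simpa using (List.mem_filter.mp hr).2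
  exact h2.symm

theorem mem_repFold {L : List (List Int)} {u : List Int} (hu : u ∈ L) : repL L u ∈ repFold L := by
  rw [repFold_eq]
  refine List.mem_filter.mpr ⟨(PySem.Set.mem_ofList _ _).mpr (repL_mem hu), ?_⟩
  simp [repL_idem hu]

theorem repFold_pairwise (L : List (List Int)) :
    (repFold L).Pairwise (fun a b => eqt a b = false) := by
  rw [repFold_eq]
  have hnd : ((PySem.Set.ofList L).filter (fun x => x == repL L x)).Nodup :=
    List.Nodup.filter _ (PySem.Set.nodup_ofList _)
  apply List.Pairwise.imp_of_mem ?_ hnd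
  intro a b ha hb hab
  have haL : a ∈ L := (PySem.Set.mem_ofList _ _).mp (List.mem_of_mem_filter ha)
  have hbL : b ∈ L := (PySem.Set.mem_ofList _ _).mp (List.mem_of_mem_filter hb)
  have hay : a = repL L a := by simpa using (List.mem_filter.mp ha).2
  have hby : b = repL L b := by simpa using (List.mem_filter.mp hb).2
  cases h : eqt a b
  · rfl
  · exact absurd (by rw [hay, hby, repL_congr haL h]) hab

theorem repFold_nodup (L : List (List Int)) : (repFold L).Nodup := by
  rw [repFold_eq]
  exact List.Nodup.filter _ (PySem.Set.nodup_ofList _)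

theorem any_repFold {L : List (List Int)} (t : List Int) :
    (repFold L).any (fun r => eqt r t) = true ↔ ∃ u ∈ L, eqt u t = true := by
  rw [List.any_eq_true]
  constructor
  · rintro ⟨r, hr, hrt⟩
    exact ⟨r, repFold_sub r hr, hrt⟩
  · rintro ⟨u, hu, hut⟩
    exact ⟨repL L u, mem_repFold hu, eqt_trans (repL_eqt hu) hut⟩

theorem init_fold_eq (T : List (List Int)) :
    T.foldl (fun d e => d.insert e [e]) (PySem.Dict.mk []) = dictQ T [] := by
  have main : ∀ l : List (List Int), l.foldl (fun d e => d.insert e [e]) (PySem.Dict.mk [])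
      = PySem.Dict.mk ((PySem.Set.ofList l).map (fun x => (x, [x]))) := by
    intro l
    induction l using List.reverseRecOn with
    | nil => rfl
    | append_singleton l e ih =>
      rw [List.foldl_append, List.foldl_cons, List.foldl_nil, ih]
      by_cases he : e ∈ PySem.Set.ofList l
      · rw [insert_mk_map_mem _ _ _ _ he, PySem.Set.ofList_append_singleton, PySem.Set.add_of_mem he]
        refine PySem.Dict.ext ?_
        simp only [items_mk]
        apply List.map_congr_left
        intro x _
        by_cases hx : x = e <;> simp [hx]
      · rw [insert_mk_map_new _ _ _ _ he, PySem.Set.ofList_append_singleton, PySem.Set.add_of_not_mem he]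
        refine PySem.Dict.ext ?_
        simp only [items_mk]
        apply List.map_congr_left
        intro x _
        by_cases hx : x = e <;> simp [hx]
  rw [main]
  unfold dictQ survQ valQ
  refine PySem.Dict.ext ?_
  simp only [items_mk]
  have hfilter : (PySem.Set.ofList T).filter
      (fun x => x == repL T x || !(List.contains [] (repL T x))) = PySem.Set.ofList T := by
    apply List.filter_eq_self.mpr
    intro x _
    simp
  rw [hfilter]
  apply List.map_congr_left
  intro x _
  simp

theorem inner_step (T P R Q : List (List Int)) (a b : List Int) (hT : T = P ++ a :: R)
    (ha : repL T a = a) (hanp : a ∉ P) (hb : b ∈ T) :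
    innerF a (dictI T P Q a) b = dictI T P (Q ++ [b]) a := by
  have haT : a ∈ T := by rw [hT]; simp
  have haOf : a ∈ PySem.Set.ofList T := (PySem.Set.mem_ofList _ _).mpr haT
  have hKnd : (survI T P Q a).Nodup := by
    unfold survI survQ
    exact List.Nodup.filter _ (List.Nodup.filter _ (PySem.Set.nodup_ofList _))
  have hcb : (dictI T P Q a).contains b = (survI T P Q a).contains b := contains_mk_map _ _ _
  unfold innerF
  by_cases hab : a = b
  · -- b is a itself: skipped, and the state formula does not move
    subst hab
    rw [if_pos (by simp)]
    unfold dictI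
    refine PySem.Dict.ext ?_
    simp only [items_mk]
    have hsurv : survI T P (Q ++ [a]) a = survI T P Q a := by
      unfold survI
      apply List.filter_congr
      intro x _
      by_cases hxa : x = a
      · simp [hxa]
      · have : (x == a) = false := by simp [hxa]
        rw [contains_snoc, this]
        simp
    rw [hsurv]
    apply List.map_congr_left
    intro x _
    unfold valI
    by_cases hxa : x = a
    · subst hxa
      simp only [beq_self_eq_true, if_true]
      rw [List.filter_append]
      have : List.filter (fun b => eqt b x && !(b == x)) [x] = [] := by simp
      rw [this, List.append_nil]
    · simp [hxa]
  · have habF : (a == b) = false := by simp [hab]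
    by_cases hbK : b ∈ survI T P Q a
    · have hcbT : (dictI T P Q a).contains b = true := by
        rw [hcb]
        simp only [List.contains_eq_mem, decide_eq_true_eq]
        exact hbK
      rw [if_neg (by rw [hcbT, habF]; simp)]
      have hbcond := (List.mem_filter.mp hbK).2
      have hbs : b ∈ survQ T P := List.mem_of_mem_filter hbK
      have hbT : b ∈ T := (PySem.Set.mem_ofList _ _).mp (List.mem_of_mem_filter hbs)
      have hbaF : (b == a) = false := by
        rw [beq_eq_false_iff_ne]
        exact fun h => hab h.symm
      by_cases heq : eqt b a = true
      · -- the interesting step: b is absorbed into a's class and erased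
        rw [if_pos heq]
        have hba : b ≠ a := fun h => hab h.symm
        have hrb : repL T b = a := repL_eq_of_eqt hbT haT ha heq
        have hbnQ : b ∉ Q := by
          intro hm
          rw [hbaF, heq] at hbcond
          simp [List.contains_eq_mem, hm] at hbcond
        have haK : a ∈ survI T P Q a := by
          refine List.mem_filter.mpr ⟨List.mem_filter.mpr ⟨haOf, by simp [ha]⟩, by simp⟩
        have hWb : valI T P Q a b = [b] := by
          unfold valI valQ
          rw [hbaF]
          have : (b == repL T b) = false := by rw [hrb]; exact hbaF
          rw [this]
          simp
        have hgetb : (dictI T P Q a).getD b [] = [b] := by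
          unfold dictI
          rw [PySem.Dict.getD_eq_get?_getD, get?_mk_map_nodup _ _ hKnd]
          simp [hbK, hWb]
        have hmod : (dictI T P Q a).modify a [] (· ++ (dictI T P Q a).getD b [])
            = PySem.Dict.mk ((survI T P Q a).map
                (fun x => (x, if x = a then valI T P Q a a ++ [b] else valI T P Q a x))) := by
          unfold PySem.Dict.modify
          rw [hgetb]
          have hgeta : (dictI T P Q a).getD a [] = valI T P Q a a := by
            unfold dictI
            rw [PySem.Dict.getD_eq_get?_getD, get?_mk_map_nodup _ _ hKnd]
            simp [haK]
          rw [hgeta]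
          unfold dictI
          exact insert_mk_map_mem _ _ _ _ haK
      
        rw [hmod, erase_mk_map]
        unfold dictI
        refine PySem.Dict.ext ?_
        simp only [items_mk]
        have hKf : survI T P (Q ++ [b]) a = (survI T P Q a).filter (fun x => !(x == b)) := by
          unfold survI
          rw [List.filter_filter]
          apply List.filter_congr
          intro x _
          by_cases hxb : x = b
          · subst hxb
            have hxQb : List.contains (Q ++ [x]) x = true := by
              simp [List.contains_eq_mem]
            rw [hxQb, hbaF, heq]
            simp
          · have hxbF : (x == b) = false := by simp [hxb]
            rw [contains_snoc, hxbF]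
            simp
        rw [hKf]
        apply List.map_congr_left
        intro x hxf
        have hxK : x ∈ survI T P Q a := List.mem_of_mem_filter hxf
        have hxb : x ≠ b := by
          have := (List.mem_filter.mp hxf).2
          simpa using this
        by_cases hxa : x = a
        · subst hxa
          simp only [if_pos rfl]
          unfold valI
          simp only [beq_self_eq_true, if_true]
          rw [List.filter_append]
          have hpredb : List.filter (fun c => eqt c x && !(c == x)) [b] = [b] := by
            simp [heq, hbaF]
          rw [hpredb, PySem.Set.update_append]
          have hupd1 : PySem.Set.update (PySem.Set.update [x] (Q.filter (fun c => eqt c x && !(c == x)))) [b]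
              = PySem.Set.add (PySem.Set.update [x] (Q.filter (fun c => eqt c x && !(c == x)))) b := by
            rw [PySem.Set.update_cons]
            rfl
          rw [hupd1, PySem.Set.add_of_not_mem]
          intro hmem
          rcases (PySem.Set.mem_update _ _ _).mp hmem with h | h
          · exact hba (by simpa using h)
          · exact hbnQ (List.mem_of_mem_filter h)
        · have hxaF : (x == a) = false := by simp [hxa]
          simp only [hxa, if_false]
          unfold valI
          rw [hxaF]
          simp
      · -- same pattern class check fails: nothing happens
        rw [if_neg heq]
        unfold dictI
        refine PySem.Dict.ext ?_
        simp only [items_mk]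
        have heqF : eqt b a = false := by
          cases h : eqt b a
          · rfl
          · exact absurd h heq
        have hsurv : survI T P (Q ++ [b]) a = survI T P Q a := by
          unfold survI
          apply List.filter_congr
          intro x hx
          by_cases hxb : x = b
          · subst hxb
            have hxQb : List.contains (Q ++ [x]) x = true := by
              simp [List.contains_eq_mem]
            rw [hxQb, heqF]
            simp
          · have hxbF : (x == b) = false := by simp [hxb]
            rw [contains_snoc, hxbF]
            simp
        rw [hsurv]
        apply List.map_congr_left
        intro x _
        unfold valI
        by_cases hxa : x = a
        · subst hxa
          simp only [beq_self_eq_true, if_true]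
          rw [List.filter_append]
          have : List.filter (fun c => eqt c x && !(c == x)) [b] = [] := by
            simp [heqF]
          rw [this, List.append_nil]
        · simp [hxa]
    · -- b is no longer a key: skipped, and the state formula does not move
      have hcbF : (dictI T P Q a).contains b = false := by
        rw [hcb]
        simp only [List.contains_eq_mem, decide_eq_false_iff_not]
        exact hbK
      rw [if_pos (by rw [hcbF]; simp)]
      -- if b is in the class of a it must already be recorded in Q (or not be in survQ at all)
      unfold dictI
      refine PySem.Dict.ext ?_
      simp only [items_mk]
      have hbcases : ∀ hbs : b ∈ survQ T P, b ∈ Q ∧ eqt b a = true ∨ eqt b a = false ∨ b = a := by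
        intro hbs
        by_cases hba : b = a
        · exact Or.inr (Or.inr hba)
        · cases heq : eqt b a
          · exact Or.inr (Or.inl rfl)
          · left
            have hcond : (b == a || !(List.contains Q b) || !(eqt b a)) = false := by
              cases hc : (b == a || !(List.contains Q b) || !(eqt b a))
              · rfl
              · exact absurd (List.mem_filter.mpr ⟨hbs, hc⟩) hbK
            simp only [heq, Bool.not_true, Bool.or_false] at hcond
            have hbaF2 : (b == a) = false := by simp [hba]
            rw [hbaF2] at hcond
            simp only [Bool.false_or, Bool.not_eq_eq_eq_not, Bool.not_false] at hcond
            refine ⟨?_, rfl⟩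
            simpa [List.contains_eq_mem] using hcond
      have hsurv : survI T P (Q ++ [b]) a = survI T P Q a := by
        unfold survI
        apply List.filter_congr
        intro x hx
        by_cases hxb : x = b
        · subst hxb
          rcases hbcases hx with ⟨hQ, heq⟩ | heq | hxa2
          · have h1 : List.contains Q x = true := by simp [List.contains_eq_mem, hQ]
            have h2 : List.contains (Q ++ [x]) x = true := by simp [List.contains_eq_mem]
            rw [h1, h2, heq]
          · rw [heq]
            simp
          · simp [hxa2]
        · have hxbF : (x == b) = false := by simp [hxb]
          rw [contains_snoc, hxbF]
          simp
      rw [hsurv]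
      apply List.map_congr_left
      intro x hxK
      unfold valI
      by_cases hxa : x = a
      · subst hxa
        simp only [beq_self_eq_true, if_true]
        rw [List.filter_append]
        by_cases hpb : (eqt b x && !(b == x)) = true
        · have hfb : List.filter (fun c => eqt c x && !(c == x)) [b] = [b] := by
            simp only [List.filter_cons, List.filter_nil, hpb, if_true]
          rw [hfb]
          have hbQ : b ∈ Q := by
            by_cases hbs : b ∈ survQ T P
            · rcases hbcases hbs with ⟨hQ, _⟩ | heq | hxa2
              · exact hQ
              · simp only [Bool.and_eq_true] at hpb
                rw [heq] at hpb
                exact absurd hpb.1 (by simp)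
              · simp only [Bool.and_eq_true] at hpb
                exact absurd hpb.2 (by simp [hxa2])
            · -- b not even a survivor: its rep is in P, impossible inside a's class
              exfalso
              simp only [Bool.and_eq_true] at hpb
              have heq : eqt b x = true := hpb.1
              have hbT2 : b ∈ T := hb
              have hrb : repL T b = x := repL_eq_of_eqt hbT2 haT ha heq
              apply hbs
              refine List.mem_filter.mpr ⟨(PySem.Set.mem_ofList _ _).mpr hbT2, ?_⟩
              rw [hrb]
              have : List.contains P x = false := by
                simp only [List.contains_eq_mem, decide_eq_false_iff_not]
                exact hanp
              rw [this]
              simp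
          rw [PySem.Set.update_append]
          have hupd1 : PySem.Set.update (PySem.Set.update [x] (Q.filter (fun c => eqt c x && !(c == x)))) [b]
              = PySem.Set.add (PySem.Set.update [x] (Q.filter (fun c => eqt c x && !(c == x)))) b := by
            rw [PySem.Set.update_cons]
            rfl
          rw [hupd1, PySem.Set.add_of_mem]
          exact (PySem.Set.mem_update _ _ _).mpr (Or.inr (List.mem_filter.mpr ⟨hbQ, by simpa using hpb⟩))
        · have hfb : List.filter (fun c => eqt c x && !(c == x)) [b] = [] := by
            simp only [List.filter_cons, List.filter_nil, hpb, if_false]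
            rfl
          rw [hfb, List.append_nil]
      · simp [hxa]

theorem inner_fold (T P R : List (List Int)) (a : List Int) (hT : T = P ++ a :: R)
    (ha : repL T a = a) (hanp : a ∉ P) :
    ∀ (Q' Q : List (List Int)), (∀ b ∈ Q', b ∈ T) →
      Q'.foldl (innerF a) (dictI T P Q a) = dictI T P (Q ++ Q') a := by
  intro Q'
  induction Q' with
  | nil => intro Q _; simp
  | cons b rest ih =>
    intro Q hmem
    rw [List.foldl_cons, inner_step T P R Q a b hT ha hanp (hmem b List.mem_cons_self)]
    rw [ih (Q ++ [b]) (fun c hc => hmem c (List.mem_cons_of_mem _ hc))]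
    simp

theorem dictI_nil (T P R : List (List Int)) (a : List Int) (hT : T = P ++ a :: R)
    (ha : repL T a = a) (hanp : a ∉ P) : dictI T P [] a = dictQ T P := by
  unfold dictI survI valI
  refine PySem.Dict.ext ?_
  simp only [items_mk]
  have hf : (survQ T P).filter (fun x => x == a || !(List.contains [] x) || !(eqt x a))
      = survQ T P := by
    apply List.filter_eq_self.mpr
    intro x _
    simp
  rw [hf]
  unfold dictQ
  simp only [items_mk]
  apply List.map_congr_left
  intro x _
  by_cases hx : x = a
  · subst hx
    have hc : (P.contains x) = false := by
      simp only [List.contains_eq_mem, decide_eq_false_iff_not]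
      exact hanp
    simp only [beq_self_eq_true, if_true, List.filter_nil, PySem.Set.update, List.foldl_nil, valQ, hc,
      Bool.and_false, if_false]
    simp
  · simp [hx]

theorem dictI_final (T P R : List (List Int)) (a : List Int) (hT : T = P ++ a :: R)
    (ha : repL T a = a) (hanp : a ∉ P) : dictI T P T a = dictQ T (P ++ [a]) := by
  have haT : a ∈ T := by rw [hT]; simp
  unfold dictI survI dictQ survQ
  refine PySem.Dict.ext ?_
  simp only [items_mk]
  rw [List.filter_filter]
  have hfc : ∀ x ∈ PySem.Set.ofList T,
      ((x == a || !(List.contains T x) || !(eqt x a)) && (x == repL T x || !(List.contains P (repL T x))))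
        = (x == repL T x || !(List.contains (P ++ [a]) (repL T x))) := by
    intro x hx
    have hxT : x ∈ T := (PySem.Set.mem_ofList _ _).mp hx
    have hTc : List.contains T x = true := by
      simp only [List.contains_eq_mem, decide_eq_true_eq]; exact hxT
    rw [hTc, contains_snoc, eqt_iff_rep hxT haT ha]
    by_cases hx1 : x = repL T x
    · have h1 : (x == repL T x) = true := by simp [← hx1]
      rw [h1]
      simp only [Bool.or_true, Bool.true_and, Bool.not_true, Bool.or_false]
      by_cases hxa : x = a
      · simp [hxa]
      · have : (repL T x == a) = false := by
          simp only [beq_eq_false_iff_ne, ne_eq, ← hx1]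
          exact hxa
        simp [hxa, this]
    · have h1 : (x == repL T x) = false := by simp [hx1]
      rw [h1]
      have hxa : x ≠ a := fun h => hx1 (by rw [h, ha])
      have h2 : (x == a) = false := by simp [hxa]
      rw [h2]
      simp only [Bool.false_or, Bool.not_true, Bool.false_and, Bool.not_false]
      cases hr : (repL T x == a) <;> simp
  rw [List.filter_congr hfc]
  apply List.map_congr_left
  intro x hx
  have hxOf : x ∈ PySem.Set.ofList T := List.mem_of_mem_filter hx
  have hxT : x ∈ T := (PySem.Set.mem_ofList _ _).mp hxOf
  unfold valI valQ
  by_cases hxa : x = a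
  · subst hxa
    have h1 : (x == x) = true := by simp
    have h2 : (x == repL T x) = true := by simp [ha]
    have h3 : List.contains (P ++ [x]) x = true := by
      rw [contains_snoc]; simp
    rw [h2, h3]
    simp only [h1, if_true, Bool.and_true, Bool.true_and]
    congr 1
    rw [update_filter_beq_absorb _ _ _ _ (List.mem_singleton_self x)]
    have hPfilter : P.filter (fun b => eqt b x) = [] := by
      apply List.filter_eq_nil_iff.mpr
      intro b hb
      simp [not_eqt_of_fresh_rep (hT ▸ ha) hanp b hb]
    have : T.filter (fun b => eqt b x) = x :: R.filter (fun b => eqt b x) := by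
      rw [hT, List.filter_append, hPfilter, List.filter_cons, if_pos (by simp [eqt_refl x])]
      rfl
    rw [this, ofList_cons_update, PySem.Set.update_cons,
      PySem.Set.add_of_mem (List.mem_singleton_self x)]
  · have h2 : (x == a) = false := by simp [hxa]
    have h3 : List.contains (P ++ [a]) x = List.contains P x := by
      rw [contains_snoc, h2, Bool.or_false]
    rw [h2, h3]
    simp

theorem outer_step (T P R : List (List Int)) (a : List Int) (hT : T = P ++ a :: R) :
    outerF T (dictQ T P) a = dictQ T (P ++ [a]) := by
  have haT : a ∈ T := by rw [hT]; simp
  have haOf : a ∈ PySem.Set.ofList T := (PySem.Set.mem_ofList _ _).mpr haT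
  have hcontains : ∀ y, (dictQ T P).contains y = (survQ T P).contains y := fun y => contains_mk_map _ _ y
  by_cases ha : repL T a = a
  · -- a is its own representative
    have hamem : a ∈ survQ T P := by
      apply List.mem_filter.mpr
      refine ⟨haOf, ?_⟩
      simp [ha]
    by_cases hap : a ∈ P
    · -- rep already processed: the inner loop is a no-op and the state formula is unchanged
      have hco : (dictQ T P).contains a = true := by
        rw [hcontains a]
        simp only [List.contains_eq_mem, decide_eq_true_eq]
        exact hamem
      unfold outerF
      rw [hco, if_pos rfl]
      have hnoop : ∀ b ∈ T, innerF a (dictQ T P) b = dictQ T P := by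
        intro b hb
        unfold innerF
        by_cases hc1 : (!(dictQ T P).contains b || a == b) = true
        · rw [if_pos hc1]
        · rw [if_neg hc1]
          simp only [Bool.or_eq_true, Bool.not_eq_eq_eq_not, Bool.not_true, beq_iff_eq] at hc1
          push_neg at hc1
          have hbs : b ∈ survQ T P := by
            have := hc1.1
            rw [hcontains b] at this
            simpa using this
          have hbT : b ∈ T := (PySem.Set.mem_ofList _ _).mp (List.mem_of_mem_filter hbs)
          have hba : b ≠ a := fun h => hc1.2 h.symm
          have heqf : eqt b a = false := by
            cases heq : eqt b a
            · rfl
            · exfalso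
              have hrb : repL T b = a := repL_eq_of_eqt hbT haT ha heq
              have hcond := (List.mem_filter.mp hbs).2
              simp only [hrb, Bool.or_eq_true, beq_iff_eq] at hcond
              rcases hcond with h | h
              · exact hba h
              · simp only [Bool.not_eq_eq_eq_not, Bool.not_true, List.contains_eq_mem,
                  decide_eq_false_iff_not] at h
                exact h hap
          rw [heqf]
          simp
      rw [foldl_id_of_fix T _ _ hnoop]
      -- dictQ T (P ++ [a]) = dictQ T P since a ∈ P
      have hct : ∀ y : List Int, (P ++ [a]).contains y = P.contains y := by
        intro y
        simp only [List.contains_eq_mem, List.mem_append, List.mem_singleton]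
        apply decide_eq_decide.mpr
        constructor
        · rintro (h | h)
          · exact h
          · exact h ▸ hap
        · exact Or.inl
      unfold dictQ survQ valQ
      refine PySem.Dict.ext ?_
      simp only [items_mk, hct]
    · -- fresh representative: the inner loop absorbs the whole class
      have hco : (dictQ T P).contains a = true := by
        rw [hcontains a]
        simp only [List.contains_eq_mem, decide_eq_true_eq]
        exact hamem
      unfold outerF
      rw [hco, if_pos rfl]
      rw [← dictI_nil T P R a hT ha hap, inner_fold T P R a hT ha hap T [] (fun _ h => h)]
      rw [List.nil_append]
      exact dictI_final T P R a hT ha hap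
  · -- a's representative was processed earlier: a is no longer in the dict, nothing changes
    have hrp : repL T a ∈ P := by
      rcases (hT ▸ repL_append_cases P R a : repL T a = a ∨ repL T a ∈ P) with h | h
      · exact absurd h ha
      · exact h
    have hns : a ∉ survQ T P := by
      intro hmem
      have hcond := (List.mem_filter.mp hmem).2
      simp only [Bool.or_eq_true, beq_iff_eq] at hcond
      rcases hcond with h | h
      · exact ha h.symm
      · simp only [Bool.not_eq_eq_eq_not, Bool.not_true, List.contains_eq_mem,
          decide_eq_false_iff_not] at h
        exact h hrp
    have hco : (dictQ T P).contains a = false := by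
      rw [hcontains a]
      simp only [List.contains_eq_mem, decide_eq_false_iff_not]
      exact hns
    unfold outerF
    rw [hco]
    simp only [Bool.false_eq_true, if_false]
    have hrne : ∀ x ∈ PySem.Set.ofList T, repL T x ≠ a := by
      intro x hx heq
      have hxT := (PySem.Set.mem_ofList _ _).mp hx
      apply ha
      calc repL T a = repL T (repL T x) := by rw [heq]
        _ = repL T x := repL_idem hxT
        _ = a := heq
    have hcnd : ∀ x ∈ PySem.Set.ofList T,
        (x == repL T x || !(List.contains (P ++ [a]) (repL T x)))
          = (x == repL T x || !(List.contains P (repL T x))) := by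
      intro x hx
      have : List.contains (P ++ [a]) (repL T x) = List.contains P (repL T x) := by
        simp only [List.contains_eq_mem, List.mem_append, List.mem_singleton]
        apply decide_eq_decide.mpr
        constructor
        · rintro (h | h)
          · exact h
          · exact absurd h (hrne x hx)
        · exact Or.inl
      rw [this]
    have hval : ∀ x ∈ PySem.Set.ofList T, valQ T (P ++ [a]) x = valQ T P x := by
      intro x hx
      unfold valQ
      by_cases hxa : x = a
      · subst hxa
        have : (x == repL T x) = false := by
          simp only [beq_eq_false_iff_ne, ne_eq]
          exact fun h => ha h.symm
        rw [this]
        simp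
      · have : List.contains (P ++ [a]) x = List.contains P x := by
          simp only [List.contains_eq_mem, List.mem_append, List.mem_singleton]
          apply decide_eq_decide.mpr
          constructor
          · rintro (h | h)
            · exact h
            · exact absurd h hxa
          · exact Or.inl
        rw [this]
    unfold dictQ survQ
    refine PySem.Dict.ext ?_
    simp only [items_mk]
    rw [List.filter_congr hcnd]
    apply List.map_congr_left
    intro x hx
    rw [hval x (List.mem_of_mem_filter hx)]

theorem outer_fold (T : List (List Int)) :
    ∀ (R P : List (List Int)), T = P ++ R → R.foldl (outerF T) (dictQ T P) = dictQ T T := by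
  intro R
  induction R with
  | nil => intro P hP; simp at hP; rw [List.foldl_nil, hP]
  | cons a R ih =>
    intro P hP
    rw [List.foldl_cons, outer_step T P R a hP]
    exact ih (P ++ [a]) (by rw [hP]; simp)

theorem quotientA_eq (T : List (List Int)) : quotientA T = dictQ T T := by
  unfold quotientA
  have hfun : (fun (d : PySem.Dict (List Int) (List (List Int))) (a : List Int) =>
      if d.contains a then
        T.foldl (fun d b =>
          if !d.contains b || a == b then d
          else if setEqNN (patron b) (patron a) then (d.modify a [] (· ++ d.getD b [])).erase b
          else d) d
      else d) = outerF T := by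
    funext d a
    unfold outerF
    have hinner : (fun (d : PySem.Dict (List Int) (List (List Int))) (b : List Int) =>
        if !d.contains b || a == b then d
        else if setEqNN (patron b) (patron a) then (d.modify a [] (· ++ d.getD b [])).erase b
        else d) = innerF a := by
      funext d b
      unfold innerF
      rw [patron_eq, patron_eq, ← keyOf_eq, ← keyOf_eq]
      rfl
    rw [hinner]
  rw [hfun, init_fold_eq]
  exact outer_fold T T [] rfl

theorem dictQ_final_items (T : List (List Int)) :
    (dictQ T T).items = (repFold T).map (fun r => (r, PySem.Set.ofList (T.filter (fun b => eqt b r)))) := by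
  unfold dictQ
  simp only [items_mk]
  have hs : survQ T T = repFold T := by
    unfold survQ
    rw [repFold_eq]
    apply List.filter_congr
    intro x hx
    have hrep : repL T x ∈ T := repL_mem ((PySem.Set.mem_ofList _ _).mp hx)
    have : (T.contains (repL T x)) = true := by
      simp only [List.contains_eq_mem, decide_eq_true_eq]
      exact hrep
    simp [this, hrep]
  rw [hs]
  apply List.map_congr_left
  intro r hr
  have hself : repL T r = r := repFold_self r hr
  have hrT : r ∈ T := repFold_sub r hr
  have hc : (T.contains r) = true := by
    simp only [List.contains_eq_mem, decide_eq_true_eq]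
    exact hrT
  simp [valQ, hself, hc, hrT]

-- ---------- B's one-pass dict grouping, closed form ----------
theorem bAdd_no_match (g : List (List (List Int) × List (List Int))) (k : List (List Int)) (t : List Int)
    (h : ∀ e ∈ g, setEqNN e.1 k = false) : bAdd g k t = g ++ [(k, [t])] := by
  induction g with
  | nil => rfl
  | cons e g ih =>
    unfold bAdd
    rw [h e List.mem_cons_self]
    simp only [Bool.false_eq_true, if_false, List.cons_append, List.cons.injEq, true_and]
    exact ih (fun e' he' => h e' (List.mem_cons_of_mem _ he'))

theorem bAdd_map_in (rs : List (List Int)) (L : List (List Int)) (t : List Int)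
    (hpw : rs.Pairwise (fun a b => eqt a b = false)) (hex : ∃ r ∈ rs, eqt r t = true) :
    bAdd (rs.map (fun r => (keyOf r, L.filter (fun u => eqt r u)))) (keyOf t) t
      = rs.map (fun r => (keyOf r, (L ++ [t]).filter (fun u => eqt r u))) := by
  induction rs with
  | nil => exact absurd hex (by simp)
  | cons r rs ih =>
    simp only [List.map_cons]
    unfold bAdd
    have hpw' := List.pairwise_cons.mp hpw
    cases hrt : eqt r t with
    | true =>
      have : setEqNN (keyOf r) (keyOf t) = true := hrt
      rw [this]
      simp only [if_true]
      congr 1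
      · rw [List.filter_append, List.filter_cons, if_pos (by simpa using hrt), List.filter_nil]
      · apply List.map_congr_left
        intro r' hr'
        have hr't : eqt r' t = false := by
          cases h : eqt r' t
          · rfl
          · exact absurd (eqt_trans hrt (eqt_symm h)) (by simp [hpw'.1 r' hr'])
        rw [List.filter_append, List.filter_cons, if_neg (by simp [hr't]), List.filter_nil,
          List.append_nil]
    | false =>
      have : setEqNN (keyOf r) (keyOf t) = false := hrt
      rw [this]
      simp only [Bool.false_eq_true, if_false]
      have hex' : ∃ r' ∈ rs, eqt r' t = true := by
        rcases hex with ⟨r', hr', h⟩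
        rcases List.mem_cons.mp hr' with h' | h'
        · exact absurd (h' ▸ h) (by simp [hrt])
        · exact ⟨r', h', h⟩
      rw [ih hpw'.2 hex']
      congr 1
      rw [List.filter_append, List.filter_cons, if_neg (by simp [hrt]), List.filter_nil,
        List.append_nil]

theorem groupsB_eq (L : List (List Int)) :
    L.foldl (fun g t => bAdd g (keyOf t) t) []
      = (repFold L).map (fun r => (keyOf r, L.filter (fun t => eqt r t))) := by
  induction L using List.reverseRecOn with
  | nil => rfl
  | append_singleton L t ih =>
    rw [List.foldl_append, List.foldl_cons, List.foldl_nil, ih]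
    have hstep : repFold (L ++ [t])
        = if (repFold L).any (fun r => eqt r t) then repFold L else repFold L ++ [t] := by
      unfold repFold
      rw [List.foldl_append, List.foldl_cons, List.foldl_nil]
    by_cases hm : (repFold L).any (fun r => eqt r t) = true
    · rw [hstep, if_pos hm]
      obtain ⟨r, hr, hrt⟩ := List.any_eq_true.mp hm
      exact bAdd_map_in (repFold L) L t (repFold_pairwise L) ⟨r, hr, hrt⟩
    · rw [hstep, if_neg hm]
      have hnone : ∀ u ∈ L, eqt u t = false := by
        intro u hu
        cases h : eqt u t
        · rfl
        · exact absurd ((any_repFold t).mpr ⟨u, hu, h⟩) hm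
      rw [bAdd_no_match]
      · rw [List.map_append]
        congr 1
        · apply List.map_congr_left
          intro r hr
          have hrt : eqt r t = false := hnone r (repFold_sub r hr)
          rw [List.filter_append, List.filter_cons, if_neg (by simp [hrt]), List.filter_nil,
            List.append_nil]
        · simp only [List.map_cons, List.map_nil]
          have h1 : L.filter (fun u => eqt t u) = [] := by
            apply List.filter_eq_nil_iff.mpr
            intro u hu
            cases h : eqt t u
            · simp
            · exact absurd (hnone u hu) (by simp [eqt_symm h])
          rw [List.filter_append, h1, List.filter_cons, if_pos (by simp [eqt_refl t]),
            List.filter_nil, List.nil_append]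
      · intro e he
        obtain ⟨r, hr, hre⟩ := List.mem_map.mp he
        have hrt : eqt r t = false := hnone r (repFold_sub r hr)
        rw [← hre]
        exact hrt

-- ---------- duplicates do not change a projection set ----------
theorem foldl_add_ofList (l : List (List Int)) (f : List Int → List Int) :
    (PySem.Set.ofList l).foldl (fun s t => PySem.Set.add s (f t)) []
      = l.foldl (fun s t => PySem.Set.add s (f t)) [] := by
  induction l using List.reverseRecOn with
  | nil => rfl
  | append_singleton l x ih =>
    rw [PySem.Set.ofList_append_singleton, List.foldl_append, List.foldl_cons, List.foldl_nil]
    by_cases hx : x ∈ l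
    · rw [PySem.Set.add_of_mem ((PySem.Set.mem_ofList _ _).mpr hx), ih]
      have : f x ∈ l.foldl (fun s t => PySem.Set.add s (f t)) [] := by
        rw [PySem.Set.mem_foldl_add]
        exact Or.inr ⟨x, hx, rfl⟩
      rw [PySem.Set.add_of_mem this]
    · rw [PySem.Set.add_of_not_mem (fun h => hx ((PySem.Set.mem_ofList _ _).mp h)),
        List.foldl_append, List.foldl_cons, List.foldl_nil, ih]

-- ---------- the projection indices coincide ----------
theorem min?_head (x : Int) (l : List Int) (h : ∀ y ∈ l, ¬(y < x)) :
    PySem.List.min? (x :: l) id = some x := by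
  induction l generalizing x with
  | nil => rfl
  | cons y l ih =>
    have hyx : ¬(y < x) := h y List.mem_cons_self
    have step : PySem.List.min? (x :: y :: l) id = PySem.List.min? (x :: l) id := by
      unfold PySem.List.min?
      rw [List.foldl_cons, List.foldl_cons, List.foldl_cons]
      congr 1
      show (if id y < id x then some y else some x) = some x
      rw [if_neg (by simpa using hyx)]
    rw [step]
    exact ih x (fun z hz => h z (List.mem_cons_of_mem _ hz))

theorem classOf_aux (t : List Int) : ∀ (s : Int) (v : Int), v ∈ t →
    ∃ (k : ℕ) (rest : List Int), PySem.List.index? t v = some k ∧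
      vf (PySem.List.enumerate t s) v = (s + (k : ℤ)) :: rest ∧ ∀ y ∈ rest, s + (k : ℤ) < y := by
  induction t with
  | nil => intro s v hv; exact absurd hv (by simp)
  | cons u t ih =>
    intro s v hv
    by_cases huv : u = v
    · refine ⟨0, vf (PySem.List.enumerate t (s + 1)) v, ?_, ?_, ?_⟩
      · simp [PySem.List.index?, List.idxOf?, List.findIdx?_cons, huv]
      · rw [enum_cons]
        unfold vf
        rw [List.filter_cons, if_pos (by simp [huv])]
        simp
      · intro y hy
        obtain ⟨p, hp, hp1⟩ := List.mem_map.mp hy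
        have := enum_fst_ge t (s + 1) p (List.mem_of_mem_filter hp)
        omega
    · have hvt : v ∈ t := by
        rcases List.mem_cons.mp hv with h | h
        · exact absurd h.symm huv
        · exact h
      obtain ⟨k, rest, hidx, hvf, hrest⟩ := ih (s + 1) v hvt
      refine ⟨k + 1, rest, ?_, ?_, ?_⟩
      · have hne : (u == v) = false := by simp [huv]
        have ht : List.findIdx? (fun x => x == v) t = some k := by
          simpa [PySem.List.index?, List.idxOf?] using hidx
        simp [PySem.List.index?, List.idxOf?, List.findIdx?_cons, hne, ht]
      · rw [enum_cons]
        unfold vf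
        rw [List.filter_cons, if_neg (by simp [huv])]
        unfold vf at hvf
        rw [hvf]
        congr 1
        push_cast
        ring
      · intro y hy
        have := hrest y hy
        push_cast
        omega

def idxZ (t : List Int) (e : Int) : Int := ((PySem.List.index? t e).getD 0 : ℕ)

theorem mem_enum_of_mem (t : List Int) (v : Int) (hv : v ∈ t) :
    ∃ p ∈ PySem.List.enumerate t 0, p.1 = idxZ t v ∧ p.2 = v := by
  obtain ⟨k, rest, hidx, hvf, _⟩ := classOf_aux t 0 v hv
  have hhead : ((0 : ℤ) + (k : ℤ)) ∈ vf (PySem.List.enumerate t 0) v := by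
    rw [hvf]; exact List.mem_cons_self
  obtain ⟨p, hp, hp1⟩ := List.mem_map.mp hhead
  refine ⟨p, List.mem_of_mem_filter hp, ?_, ?_⟩
  · rw [hp1]
    unfold idxZ
    rw [hidx]
    simp
  · simpa using (List.mem_filter.mp hp).2

theorem idxZ_inj (t : List Int) : ∀ v ∈ t, ∀ w ∈ t, idxZ t v = idxZ t w → v = w := by
  intro v hv w hw h
  obtain ⟨p, hp, hp1, hp2⟩ := mem_enum_of_mem t v hv
  obtain ⟨q, hq, hq1, hq2⟩ := mem_enum_of_mem t w hw
  have : p = q := enum_inj t 0 hp hq (by rw [hp1, hq1, h])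
  rw [← hp2, ← hq2, this]

theorem ofList_map_inj {α β : Type} [BEq α] [LawfulBEq α] [BEq β] [LawfulBEq β]
    (l : List α) (f : α → β) (hinj : ∀ x ∈ l, ∀ y ∈ l, f x = f y → x = y) :
    PySem.Set.ofList (l.map f) = (PySem.Set.ofList l).map f := by
  induction l using List.reverseRecOn with
  | nil => rfl
  | append_singleton l x ih =>
    have hinj' : ∀ a ∈ l, ∀ b ∈ l, f a = f b → a = b := fun a ha b hb =>
      hinj a (List.mem_append_left _ ha) b (List.mem_append_left _ hb)
    rw [List.map_append, List.map_singleton, PySem.Set.ofList_append_singleton,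
      PySem.Set.ofList_append_singleton, ih hinj']
    by_cases hx : x ∈ l
    · rw [PySem.Set.add_of_mem ((PySem.Set.mem_ofList _ _).mpr hx),
        PySem.Set.add_of_mem (List.mem_map.mpr ⟨x, (PySem.Set.mem_ofList _ _).mpr hx, rfl⟩)]
    · have hfx : f x ∉ (PySem.Set.ofList l).map f := by
        intro hmem
        obtain ⟨y, hy, hyx⟩ := List.mem_map.mp hmem
        have hyl : y ∈ l := (PySem.Set.mem_ofList _ _).mp hy
        have := hinj y (List.mem_append_left _ hyl) x (List.mem_append_right _ (List.mem_singleton_self x)) hyx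
        exact hx (this ▸ hyl)
      rw [PySem.Set.add_of_not_mem hfx,
        PySem.Set.add_of_not_mem (fun h => hx ((PySem.Set.mem_ofList _ _).mp h)),
        List.map_append, List.map_singleton]

theorem minmap_eq (t : List Int) :
    (classList t).map (fun c => (PySem.List.min? c id).getD 0)
      = PySem.Set.ofList (t.map (fun e => idxZ t e)) := by
  unfold classList
  rw [List.map_map]
  have hpt : ∀ v ∈ PySem.Set.ofList t,
      ((fun c => (PySem.List.min? c id).getD 0) ∘ classOf t) v = idxZ t v := by
    intro v hv
    have hvt : v ∈ t := (PySem.Set.mem_ofList _ _).mp hv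
    obtain ⟨k, rest, hidx, hvf, hrest⟩ := classOf_aux t 0 v hvt
    have hclass : classOf t v = ((0 : ℤ) + (k : ℤ)) :: rest := hvf
    simp only [Function.comp_apply, hclass]
    rw [min?_head _ _ (fun y hy => not_lt_of_gt (hrest y hy))]
    unfold idxZ
    rw [hidx]
    simp
  rw [List.map_congr_left hpt, ← ofList_map_inj t (idxZ t) (idxZ_inj t)]

theorem limpia_eq (t : List Int) :
    limpia t = PySem.List.sorted (PySem.Set.ofList (t.map (fun e => idxZ t e))) id := by
  unfold limpia
  congr 1
  rw [← PySem.Set.update_map_eq_foldl_add, PySem.Set.update_nil_left]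
  rfl

theorem eqt_comm (a b : List Int) : eqt a b = eqt b a := by
  rw [Bool.eq_iff_iff]
  exact ⟨eqt_symm, eqt_symm⟩

theorem fold_append_map {α β : Type} (l : List α) (f : α → β) :
    l.foldl (fun res x => res ++ [f x]) [] = l.map f := by
  have aux : ∀ acc : List β, l.foldl (fun res x => res ++ [f x]) acc = acc ++ l.map f := by
    induction l with
    | nil => intro acc; simp
    | cons x l ih =>
      intro acc
      rw [List.foldl_cons, ih]
      simp
  simpa using aux []

theorem keys_mk_map {κ ν : Type} (S : List κ) (v : κ → ν) :
    (PySem.Dict.mk (S.map (fun x => (x, v x)))).keys = S := by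
  unfold PySem.Dict.keys
  simp [List.map_map, Function.comp_def]

theorem main_eq (T : List (List Int)) : preprocesamiento T = preprocesamiento_alt T := by
  unfold preprocesamiento preprocesamiento_alt
  have hq : quotientA T = PySem.Dict.mk ((repFold T).map
      (fun r => (r, PySem.Set.ofList (T.filter (fun b => eqt b r))))) := by
    rw [quotientA_eq]
    exact PySem.Dict.ext (dictQ_final_items T)
  rw [hq, groupsB_eq]
  show List.foldl addT []
      (List.foldl (fun res p => res ++ [List.foldl (fun s t => PySem.Set.add s (proj (limpia p) t)) []
        ((PySem.Dict.mk ((repFold T).map (fun r => (r, PySem.Set.ofList (T.filter (fun b => eqt b r)))))).getD p [])])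
        [] (PySem.Dict.mk ((repFold T).map (fun r => (r, PySem.Set.ofList (T.filter (fun b => eqt b r)))))).keys)
    = List.foldl (fun res p => addT res (List.foldl (fun s t => PySem.Set.add s
        (proj (PySem.List.sorted (p.1.map (fun c => (PySem.List.min? c id).getD 0)) id) t)) [] p.2))
        [] ((repFold T).map (fun r => (keyOf r, T.filter (fun t => eqt r t))))
  rw [keys_mk_map, fold_append_map, List.foldl_map, List.foldl_map]
  apply PySem.List.foldl_congr_mem
  intro acc r hr
  congr 1
  -- the group on A's side
  have hgetD : (PySem.Dict.mk ((repFold T).map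
      (fun r => (r, PySem.Set.ofList (T.filter (fun b => eqt b r)))))).getD r []
        = PySem.Set.ofList (T.filter (fun b => eqt b r)) := by
    rw [PySem.Dict.getD_eq_get?_getD, get?_mk_map_nodup _ _ (repFold_nodup T)]
    simp [hr]
  rw [hgetD, foldl_add_ofList]
  -- the two filters agree
  have hfilters : (fun b => eqt b r) = (fun t => eqt r t) := funext (fun b => eqt_comm b r)
  rw [hfilters]
  -- the two index lists agree
  have hidxs : limpia r
      = PySem.List.sorted ((keyOf r).map (fun c => (PySem.List.min? c id).getD 0)) id := by
    rw [limpia_eq, keyOf_eq, minmap_eq]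
  rw [hidxs]

-- ===== VERDICT (by name: the statement is the Claim_ definition above) =====
theorem preprocesamiento_spec : Claim_equal_preprocesamiento := by
  intro T _
  unfold Spec_preprocesamiento
  exact main_eq T
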